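-- pv_equiv track=rewrite | github.com/bkasiraju/Release-Review-Tracker | server.py | merge_month_comment
-- ===== SOURCE A (Python) =====
-- MONTH_ORDER = ['April', 'May', 'June', 'July']
--
-- def merge_month_comment(existing_comments, month_label, new_text):
--     sections = {}
--     current_month = None
--     lines = (existing_comments or '').split('\n')
--
--     for line in lines:
--         stripped = line.strip()
--         matched = False
--         for m in MONTH_ORDER:
--             if stripped.lower().startswith(m.lower() + ':') or stripped.lower().startswith(m.lower() + ' '):
--                 current_month = m
--                 rest = stripped[len(m):].lstrip(':').strip()
--                 sections[m] = rest
--                 matched = True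
--                 break
--         if not matched and current_month:
--             sections[current_month] = sections.get(current_month, '') + '\n' + line
--
--     sections[month_label] = new_text.strip()
--
--     result_parts = []
--     for m in MONTH_ORDER:
--         if m in sections and sections[m].strip():
--             result_parts.append(f"{m}: {sections[m].strip()}")
--     return '\n'.join(result_parts)
-- ===== SOURCE B (Python) =====
-- MONTH_ORDER = ['April', 'May', 'June', 'July']
--
-- def _header(line):
--     """Return (month, text-after-header) if line is a month header, else None."""
--     s = line.strip()
--     low = s.lower()
--     for m in MONTH_ORDER:
--         ml = m.lower()
--         if low.startswith(ml + ':') or low.startswith(ml + ' '):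
--             return m, s[len(m):].lstrip(':').strip()
--     return None
--
-- def merge_month_comment(existing_comments, month_label, new_text):
--     # Back-to-front single pass: the last header of each month wins, so walk the
--     # lines in reverse, buffering non-header lines and attaching the buffer to the
--     # first (i.e. chronologically last) header of each month we meet.
--     sections = {}
--     tail = []  # pending non-header lines, in reverse chronological order
--     for line in reversed((existing_comments or '').split('\n')):
--         h = _header(line)
--         if h is None:
--             tail.append(line)
--         else:
--             m, rest = h
--             if m not in sections:
--                 sections[m] = rest + ''.join('\n' + t for t in reversed(tail))
--             tail = []
--     sections[month_label] = new_text.strip()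
--     parts = [m + ': ' + sections[m].strip() for m in MONTH_ORDER
--              if m in sections and sections[m].strip()]
--     return '\n'.join(parts)
-- ===== Notes on version B (the rewrite author's own statement) =====
-- stated objective: alternative
-- what changed: Replaces A's forward stateful accumulator (current_month tracking plus incremental per-line string appends into the dict) by a single reverse pass that buffers pending lines and attaches the whole buffer to the first header met going backwards (= the last occurrence of each month), with first-seen-wins instead of overwrite.
import Mathlib
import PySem

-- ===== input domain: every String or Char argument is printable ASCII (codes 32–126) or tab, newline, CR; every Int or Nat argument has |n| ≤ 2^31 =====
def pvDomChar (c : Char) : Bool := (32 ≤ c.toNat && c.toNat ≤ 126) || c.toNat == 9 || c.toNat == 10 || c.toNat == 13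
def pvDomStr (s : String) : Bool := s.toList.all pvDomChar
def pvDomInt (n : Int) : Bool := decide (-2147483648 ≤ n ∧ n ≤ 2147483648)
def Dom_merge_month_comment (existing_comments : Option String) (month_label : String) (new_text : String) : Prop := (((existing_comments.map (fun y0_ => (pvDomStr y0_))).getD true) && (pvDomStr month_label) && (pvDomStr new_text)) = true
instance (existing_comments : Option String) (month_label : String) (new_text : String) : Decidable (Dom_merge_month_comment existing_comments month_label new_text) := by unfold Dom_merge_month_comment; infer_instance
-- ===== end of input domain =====

-- B replaces A's forward pass with stateful current-month accumulation by a single reverse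
-- pass buffering pending lines and attaching them to the last header of each month
-- (first-seen-wins going backwards); same return value, no speed claim.

-- ===== PORT A =====
def MONTH_ORDER : List String := ["April", "May", "June", "July"]

-- s.lstrip(':') — hand port (no PySem lstrip-with-chars): exact, drops the leading ':' run
def pyLstripColon (s : String) : String := String.ofList (s.toList.dropWhile (· == ':'))

-- A's inner `for m in MONTH_ORDER: … break`: first matching month with the rest it computes
def headScanA (stripped : String) : List String → Option (String × String)
  | [] => none
  | m :: ms =>
    if PySem.Str.startswith (PySem.Str.lower stripped) (PySem.Str.lower m ++ ":")
        || PySem.Str.startswith (PySem.Str.lower stripped) (PySem.Str.lower m ++ " ") then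
      some (m, PySem.Str.strip (pyLstripColon (PySem.Str.slice stripped (some (PySem.Str.len m)) none)))
    else headScanA stripped ms

-- A's loop body: state = (sections, current_month)
def stepA (st : PySem.Dict String String × Option String) (line : String) :
    PySem.Dict String String × Option String :=
  let stripped := PySem.Str.strip line
  match headScanA stripped MONTH_ORDER with
  | some (m, rest) => (st.1.insert m rest, some m)
  | none =>
    match st.2 with
    | some cur => (st.1.insert cur (st.1.getD cur "" ++ "\n" ++ line), st.2)
    | none => st

def merge_month_comment (existing_comments : Option String) (month_label : String) (new_text : String) : String :=
  let lines := (PySem.Str.split? (existing_comments.getD "") "\n").getD []  -- sep ≠ "" ⇒ always some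
  let sections := (lines.foldl stepA (PySem.Dict.empty, none)).1
  let sections := sections.insert month_label (PySem.Str.strip new_text)
  let parts := MONTH_ORDER.foldl (fun acc m =>
    match sections.get? m with          -- `m in sections and sections[m].strip()`
    | some v => if PySem.Str.strip v ≠ "" then acc ++ [m ++ ": " ++ PySem.Str.strip v] else acc
    | none => acc) []
  PySem.Str.join "\n" parts

-- ===== PORT B =====
-- B's _header helper: month + rest iff the line is a month header
def headerGo (low s : String) : List String → Option (String × String)
  | [] => none
  | m :: ms =>
    let ml := PySem.Str.lower m
    if PySem.Str.startswith low (ml ++ ":") || PySem.Str.startswith low (ml ++ " ") then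
      some (m, PySem.Str.strip (pyLstripColon (PySem.Str.slice s (some (PySem.Str.len m)) none)))
    else headerGo low s ms

def headerB (line : String) : Option (String × String) :=
  let s := PySem.Str.strip line
  headerGo (PySem.Str.lower s) s MONTH_ORDER

-- ''.join('\n' + t for t in reversed(tail))
def joinTailB (tail : List String) : String :=
  PySem.Str.join "" (tail.reverse.map (fun t => "\n" ++ t))

-- B's loop body over reversed lines: state = (sections, pending tail)
def stepB (st : PySem.Dict String String × List String) (line : String) :
    PySem.Dict String String × List String :=
  match headerB line with
  | none => (st.1, st.2 ++ [line])
  | some (m, rest) =>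
    ((if st.1.contains m then st.1 else st.1.insert m (rest ++ joinTailB st.2)), [])

def merge_month_comment_alt (existing_comments : Option String) (month_label : String) (new_text : String) : String :=
  let lines := (PySem.Str.split? (existing_comments.getD "") "\n").getD []
  let sections := (lines.reverse.foldl stepB (PySem.Dict.empty, [])).1
  let sections := sections.insert month_label (PySem.Str.strip new_text)
  let parts := MONTH_ORDER.filterMap (fun m =>
    match sections.get? m with
    | some v => if PySem.Str.strip v ≠ "" then some (m ++ ": " ++ PySem.Str.strip v) else none
    | none => none)
  PySem.Str.join "\n" parts

-- ===== PRECONDITION & SPEC =====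
def Spec_merge_month_comment (existing_comments : Option String) (month_label : String) (new_text : String) (out : String) : Prop := out = merge_month_comment_alt existing_comments month_label new_text
instance (existing_comments : Option String) (month_label : String) (new_text : String) (out : String) : Decidable (Spec_merge_month_comment existing_comments month_label new_text out) := by unfold Spec_merge_month_comment; infer_instance

-- ===== CLAIM (what is proved, stated in full; the proofs are below) =====
def Claim_equal_merge_month_comment : Prop := ∀ (existing_comments : Option String) (month_label : String) (new_text : String), Dom_merge_month_comment existing_comments month_label new_text → Spec_merge_month_comment existing_comments month_label new_text (merge_month_comment existing_comments month_label new_text)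

-- ===== LEMMAS AND PROOFS =====
-- B's loop over lines.reverse, as a foldr over lines
def bRes (ls : List String) : PySem.Dict String String × List String :=
  ls.foldr (fun l st => stepB st l) (PySem.Dict.empty, [])

theorem headScan_eq (line : String) :
    headScanA (PySem.Str.strip line) MONTH_ORDER = headerB line := rfl

theorem join_empty_cons (a : List Char) (rest : List (List Char)) :
    PySem.Chars.join [] (a :: rest) = a ++ PySem.Chars.join [] rest := by
  cases rest with
  | nil => simp [PySem.Chars.join_singleton, PySem.Chars.join_nil]
  | cons b r => rw [PySem.Chars.join_cons_cons]; simp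

theorem joinTailB_nil : joinTailB [] = "" := by decide

theorem joinTailB_append (tl : List String) (l : String) :
    joinTailB (tl ++ [l]) = ("\n" ++ l) ++ joinTailB tl := by
  apply String.toList_inj.mp
  simp [joinTailB, PySem.Str.toList_join, join_empty_cons]

-- main invariant, current_month = some m (m present in sections with value v)
theorem loop_some (ls : List String) :
    ∀ (sec : PySem.Dict String String) (m v : String), sec.get? m = some v → ∀ k,
      ((ls.foldl stepA (sec, some m)).1).get? k
        = ((bRes ls).1.get? k).or
            (if k = m then some (v ++ joinTailB (bRes ls).2) else sec.get? k) := by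
  induction ls with
  | nil =>
    intro sec m v h k
    by_cases hk : k = m <;>
      simp [bRes, hk, h, joinTailB_nil, String.append_empty, PySem.Dict.get?_empty, Option.or]
  | cons l ls ih =>
    intro sec m v h k
    have hbr : bRes (l :: ls) = stepB (bRes ls) l := by
      unfold bRes; rw [List.foldr_cons]
    rw [List.foldl_cons, hbr]
    have hstep : stepA (sec, some m) l
          = (match headerB l with
             | some (m', rest) => (sec.insert m' rest, some m')
             | none => (sec.insert m (sec.getD m "" ++ "\n" ++ l), some m)) := by
      simp only [stepA, ← headScan_eq l]
    rw [hstep]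
    cases hh : headerB l with
    | none =>
      -- non-header line: A appends it to m's entry; B buffers it in the tail
      rw [ih (sec.insert m (sec.getD m "" ++ "\n" ++ l)) m _ (PySem.Dict.get?_insert_self _ _ _) k]
      have hb : stepB (bRes ls) l = ((bRes ls).1, (bRes ls).2 ++ [l]) := by
        simp [stepB, hh]
      rw [hb]
      by_cases hk : k = m
      · subst hk
        rw [PySem.Dict.getD_of_get?_eq_some _ _ h]
        simp [joinTailB_append, String.append_assoc]
      · simp [hk, PySem.Dict.get?_insert_of_ne _ _ hk]
    | some p =>
      obtain ⟨m', rest⟩ := p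
      rw [ih (sec.insert m' rest) m' _ (PySem.Dict.get?_insert_self _ _ _) k]
      have hb : stepB (bRes ls) l
          = ((if (bRes ls).1.contains m' then (bRes ls).1
              else (bRes ls).1.insert m' (rest ++ joinTailB (bRes ls).2)), []) := by
        simp [stepB, hh]
      rw [hb]
      have hmv : (if k = m then some (v ++ joinTailB ([] : List String)) else sec.get? k)
          = sec.get? k := by
        by_cases hk : k = m
        · subst hk; simp [joinTailB_nil, String.append_empty, h]
        · simp [hk]
      rw [hmv]
      by_cases hc : (bRes ls).1.contains m' = true
      · have hs : ((bRes ls).1.get? m').isSome := by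
          rw [← PySem.Dict.contains_eq_isSome_get?]; exact hc
        simp only [hc, if_pos]
        cases hbk : (bRes ls).1.get? k with
        | some w => simp [Option.or]
        | none =>
          have hk' : k ≠ m' := by
            intro he; rw [← he, hbk] at hs; simp at hs
          simp [Option.or, hk', PySem.Dict.get?_insert_of_ne _ _ hk']
      · have hn : (bRes ls).1.get? m' = none := by
          have := PySem.Dict.contains_eq_isSome_get? (bRes ls).1 m'
          rw [Bool.not_eq_true] at hc
          rw [hc] at this
          cases hx : (bRes ls).1.get? m' with
          | none => rfl
          | some w => rw [hx] at this; simp at this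
        simp only [hc, if_neg, Bool.false_eq_true, not_false_eq_true]
        by_cases hk : k = m'
        · subst hk
          simp [hn, Option.or, PySem.Dict.get?_insert_self]
        · rw [PySem.Dict.get?_insert_of_ne _ _ hk,
              PySem.Dict.get?_insert_of_ne _ _ hk]
          simp [hk]

-- top level: current_month = none
theorem loop_none (ls : List String) :
    ∀ (sec : PySem.Dict String String) (k : String),
      ((ls.foldl stepA (sec, none)).1).get? k = ((bRes ls).1.get? k).or (sec.get? k) := by
  induction ls with
  | nil => intro sec k; simp [bRes, PySem.Dict.get?_empty, Option.or]
  | cons l ls ih =>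
    intro sec k
    have hbr : bRes (l :: ls) = stepB (bRes ls) l := by
      unfold bRes; rw [List.foldr_cons]
    rw [List.foldl_cons, hbr]
    have hstep : stepA (sec, none) l
          = (match headerB l with
             | some (m', rest) => (sec.insert m' rest, some m')
             | none => (sec, none)) := by
      simp only [stepA, ← headScan_eq l]
    rw [hstep]
    cases hh : headerB l with
    | none =>
      rw [ih sec k]
      have hb : stepB (bRes ls) l = ((bRes ls).1, (bRes ls).2 ++ [l]) := by simp [stepB, hh]
      rw [hb]
    | some p =>
      obtain ⟨m', rest⟩ := p
      rw [loop_some ls (sec.insert m' rest) m' _ (PySem.Dict.get?_insert_self _ _ _) k]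
      have hb : stepB (bRes ls) l
          = ((if (bRes ls).1.contains m' then (bRes ls).1
              else (bRes ls).1.insert m' (rest ++ joinTailB (bRes ls).2)), []) := by
        simp [stepB, hh]
      rw [hb]
      by_cases hc : (bRes ls).1.contains m' = true
      · have hs : ((bRes ls).1.get? m').isSome := by
          rw [← PySem.Dict.contains_eq_isSome_get?]; exact hc
        simp only [hc, if_pos]
        cases hbk : (bRes ls).1.get? k with
        | some w => simp [Option.or]
        | none =>
          have hk' : k ≠ m' := by
            intro he; rw [← he, hbk] at hs; simp at hs
          simp [Option.or, hk', PySem.Dict.get?_insert_of_ne _ _ hk']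
      · have hn : (bRes ls).1.get? m' = none := by
          have := PySem.Dict.contains_eq_isSome_get? (bRes ls).1 m'
          rw [Bool.not_eq_true] at hc
          rw [hc] at this
          cases hx : (bRes ls).1.get? m' with
          | none => rfl
          | some w => rw [hx] at this; simp at this
        simp only [hc, if_neg, Bool.false_eq_true, not_false_eq_true]
        by_cases hk : k = m'
        · subst hk; simp [hn, Option.or, PySem.Dict.get?_insert_self]
        · rw [PySem.Dict.get?_insert_of_ne _ _ hk,
              PySem.Dict.get?_insert_of_ne _ _ hk]
          simp [hk]

theorem sections_agree (ls : List String) (k : String) :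
    ((ls.foldl stepA (PySem.Dict.empty, none)).1).get? k
      = ((ls.reverse.foldl stepB (PySem.Dict.empty, [])).1).get? k := by
  rw [loop_none ls PySem.Dict.empty k, List.foldl_reverse]
  simp [bRes, PySem.Dict.get?_empty, Option.or]
  cases (List.foldr (fun l st => stepB st l) (PySem.Dict.empty, []) ls).1.get? k <;> rfl

theorem foldl_opt_append {α β : Type} (f : α → Option β) :
    ∀ (ms : List α) (acc : List β),
      ms.foldl (fun acc m => acc ++ (f m).toList) acc = acc ++ ms.filterMap f := by
  intro ms
  induction ms with
  | nil => intro acc; simp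
  | cons m ms ih =>
    intro acc
    rw [List.foldl_cons, ih, List.filterMap_cons]
    cases f m <;> simp

-- ===== VERDICT (by name: the statement is the Claim_ definition above) =====
theorem merge_month_comment_spec : Claim_equal_merge_month_comment := by
  intro ec ml nt _
  unfold Spec_merge_month_comment merge_month_comment merge_month_comment_alt
  simp only []
  set ls := (PySem.Str.split? (ec.getD "") "\n").getD [] with hls
  set dA := ((ls.foldl stepA (PySem.Dict.empty, none)).1).insert ml (PySem.Str.strip nt) with hdA
  set dB := ((ls.reverse.foldl stepB (PySem.Dict.empty, [])).1).insert ml (PySem.Str.strip nt) with hdB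
  have hsec : ∀ k, dA.get? k = dB.get? k := by
    intro k
    rw [hdA, hdB, PySem.Dict.get?_insert, PySem.Dict.get?_insert, sections_agree]
  have hfun : (fun (acc : List String) (m : String) =>
        match dA.get? m with
        | some v => if PySem.Str.strip v ≠ "" then acc ++ [m ++ ": " ++ PySem.Str.strip v] else acc
        | none => acc)
      = (fun acc m => acc ++
        (match dA.get? m with
         | some v => if PySem.Str.strip v ≠ "" then some (m ++ ": " ++ PySem.Str.strip v)
                     else none
         | none => none).toList) := by
    funext acc m
    cases dA.get? m with
    | none => simp
    | some v => by_cases hv : PySem.Str.strip v ≠ "" <;> simp [hv]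
  congr 1
  rw [hfun, foldl_opt_append]
  simp only [List.nil_append]
  exact List.filterMap_congr (fun m _ => by rw [hsec m])
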